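-- pv_equiv track=rewrite | github.com/dtorresUSB/Prog_G1 | Sesion8/longitud_caracter.py | longitud
-- ===== SOURCE A (Python) =====
-- def longitud(lista):
--     #----------valores iniciales----------
--     idx=0
--     maximo=len(lista[0])
--     valores=[]
--     #-------------------------------------
--     for i in lista:
--         if len(i)>len(lista[idx]):
--             idx=lista.index(i)
--             maximo=len(i)
--             valores.clear()
--             valores.append(i)
--         elif len(i)==len(lista[idx]):
--             valores.append(i)
--     return valores
-- ===== SOURCE B (Python) =====
-- def longitud(lista):
--     m = max(map(len, lista))
--     return [x for x in lista if len(x) == m]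
-- ===== Notes on version B (the rewrite author's own statement) =====
-- stated objective: simpler
-- what changed: B computes the maximum length once with max() and then filters in a second pass, instead of A's fused scan that tracks an index/max and rebuilds the result list with clear/append (and calls list.index inside the loop).
import Mathlib
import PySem

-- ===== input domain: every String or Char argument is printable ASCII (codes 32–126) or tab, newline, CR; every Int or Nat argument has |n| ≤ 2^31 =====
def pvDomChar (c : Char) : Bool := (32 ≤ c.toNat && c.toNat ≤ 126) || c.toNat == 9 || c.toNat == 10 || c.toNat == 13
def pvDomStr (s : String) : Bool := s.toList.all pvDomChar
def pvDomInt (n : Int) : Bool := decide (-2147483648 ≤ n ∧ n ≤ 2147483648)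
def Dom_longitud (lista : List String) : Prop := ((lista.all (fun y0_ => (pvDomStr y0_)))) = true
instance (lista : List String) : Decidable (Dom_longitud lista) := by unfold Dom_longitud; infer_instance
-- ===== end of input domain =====

-- B computes the maximum length in one max() pass and then filters, instead of A's fused
-- scan tracking an index/max with clear/append and list.index; same return value on nonempty lists.


-- ===== PORT A =====
-- the loop body: state (idx, maximo, valores)
def longitudStep (lista : List String) (st : Int × Int × List String) (i : String) :
    Int × Int × List String :=
  if PySem.Str.len i > PySem.Str.len (PySem.List.pyGetD lista st.1 "") then
    ((((PySem.List.index? lista i).getD 0 : Nat) : Int), PySem.Str.len i, [i])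
  else if PySem.Str.len i = PySem.Str.len (PySem.List.pyGetD lista st.1 "") then
    (st.1, st.2.1, st.2.2 ++ [i])
  else
    st

def longitud (lista : List String) : List String :=
  -- maximo = len(lista[0]): lista[0] raises IndexError on []; [] is excluded by Pre_longitud
  (lista.foldl (longitudStep lista)
      (0, PySem.Str.len (PySem.List.pyGetD lista 0 ""), ([] : List String))).2.2

-- ===== PORT B =====
def longitud_alt (lista : List String) : List String :=
  -- max(map(len, lista)): raises ValueError on []; [] is excluded by Pre_longitud
  let m := (PySem.List.max? (lista.map PySem.Str.len) (fun y => y)).getD 0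
  lista.filter (fun x => PySem.Str.len x == m)

-- ===== PRECONDITION & SPEC =====
-- A raises IndexError (and B ValueError) on the empty list; Pre_ excludes only that input.
def Pre_longitud (lista : List String) : Prop := lista ≠ []
instance (lista : List String) : Decidable (Pre_longitud lista) := by unfold Pre_longitud; infer_instance
def pvWitness_longitud : List String := (["ab", "c", "de"])

def Spec_longitud (lista : List String) (out : List String) : Prop := out = longitud_alt lista
instance (lista : List String) (out : List String) : Decidable (Spec_longitud lista out) := by unfold Spec_longitud; infer_instance

-- ===== CLAIM (what is proved, stated in full; the proofs are below) =====
def Claim_equal_longitud : Prop := ∀ (lista : List String), Dom_longitud lista → Pre_longitud lista → Spec_longitud lista (longitud lista)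

-- ===== LEMMAS AND PROOFS =====

-- simplified loop body: state (current max length, valores); A's idx/maximo bookkeeping reduced away
def stepS (st : Int × List String) (i : String) : Int × List String :=
  if PySem.Str.len i > st.1 then (PySem.Str.len i, [i])
  else if PySem.Str.len i = st.1 then (st.1, st.2 ++ [i])
  else st

def maxFrom (m : Int) (rest : List String) : Int :=
  rest.foldl (fun a x => max a (PySem.Str.len x)) m

lemma le_maxFrom (m : Int) (rest : List String) : m ≤ maxFrom m rest :=
  (PySem.List.le_foldl_max_int rest PySem.Str.len m).1

-- A's full fold equals the simplified fold, given lista[idx] has length m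
lemma loopA_eq (lista : List String) :
    ∀ (rest : List String), (∀ x ∈ rest, x ∈ lista) →
    ∀ (idx maximo : Int) (vs : List String) (m : Int),
      PySem.Str.len (PySem.List.pyGetD lista idx "") = m →
      (rest.foldl (longitudStep lista) (idx, maximo, vs)).2.2 =
        (rest.foldl stepS (m, vs)).2 := by
  intro rest
  induction rest with
  | nil => intro _ idx maximo vs m hm; rfl
  | cons i rest ih =>
    intro hsub idx maximo vs m hm
    have hi : i ∈ lista := hsub i (by simp)
    have hsub' : ∀ x ∈ rest, x ∈ lista := fun x hx => hsub x (by simp [hx])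
    rw [List.foldl_cons, List.foldl_cons]
    simp only [longitudStep, stepS, hm]
    split_ifs with h1 h2
    · -- new idx = first index of i in lista; lista[new idx] = i, so its length is len i
      obtain ⟨k, hk⟩ : ∃ k, PySem.List.index? lista i = some k :=
        Option.isSome_iff_exists.mp ((PySem.List.index?_isSome_iff lista i).2 hi)
      obtain ⟨hklt, hgetk, -⟩ := PySem.List.getElem_of_index?_eq_some hk
      have hnew : PySem.Str.len (PySem.List.pyGetD lista
          ((((PySem.List.index? lista i).getD 0 : Nat) : Int)) "") = PySem.Str.len i := by
        rw [hk, Option.getD_some, PySem.List.pyGetD_natCast,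
            List.getD_eq_getElem lista "" hklt, hgetk]
      exact ih hsub' _ _ _ _ hnew
    · exact ih hsub' _ _ _ _ hm
    · exact ih hsub' _ _ _ _ hm

-- characterisation of the simplified fold: running max plus filter
lemma foldS_eq : ∀ (rest : List String) (m : Int) (vs : List String),
    rest.foldl stepS (m, vs) =
      (maxFrom m rest,
       (if m = maxFrom m rest then vs else []) ++
         rest.filter (fun x => PySem.Str.len x == maxFrom m rest)) := by
  intro rest
  induction rest with
  | nil => intro m vs; simp [maxFrom]
  | cons i rest ih =>
    intro m vs
    have hM : maxFrom m (i :: rest) = maxFrom (max m (PySem.Str.len i)) rest := rfl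
    rw [List.foldl_cons]
    simp only [stepS]
    by_cases h1 : PySem.Str.len i > m
    · rw [if_pos h1]
      have hmax : max m (PySem.Str.len i) = PySem.Str.len i := max_eq_right (le_of_lt h1)
      rw [ih, hM, hmax]
      have hle : PySem.Str.len i ≤ maxFrom (PySem.Str.len i) rest := le_maxFrom _ _
      have hne : ¬ m = maxFrom (PySem.Str.len i) rest := by omega
      rw [if_neg hne, List.filter_cons]
      by_cases hc : PySem.Str.len i = maxFrom (PySem.Str.len i) rest
      · rw [if_pos hc, if_pos (beq_iff_eq.mpr hc)]
        simp only [List.singleton_append, List.nil_append]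
      · rw [if_neg hc, if_neg (fun hb => hc (beq_iff_eq.mp hb))]
    · have hmax : max m (PySem.Str.len i) = m := max_eq_left (not_lt.mp h1)
      by_cases h2 : PySem.Str.len i = m
      · rw [if_neg h1, if_pos h2, ih, hM, hmax, List.filter_cons]
        by_cases hmm : m = maxFrom m rest
        · rw [if_pos hmm, if_pos hmm, if_pos (beq_iff_eq.mpr (h2.trans hmm))]
          simp only [List.append_assoc, List.singleton_append]
        · rw [if_neg hmm, if_neg hmm,
              if_neg (fun hb => hmm (h2.symm.trans (beq_iff_eq.mp hb)))]
      · rw [if_neg h1, if_neg h2, ih, hM, hmax, List.filter_cons]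
        have hlt : PySem.Str.len i < m := lt_of_le_of_ne (not_lt.mp h1) h2
        have hle : m ≤ maxFrom m rest := le_maxFrom _ _
        have hni : ¬ PySem.Str.len i = maxFrom m rest := by omega
        rw [if_neg (fun hb => hni (beq_iff_eq.mp hb))]

-- ===== VERDICT (by name: the statement is the Claim_ definition above) =====
theorem longitud_spec : Claim_equal_longitud := by
  intro lista _ hpre
  unfold Spec_longitud
  match lista, hpre with
  | h :: t, _ =>
    -- A side
    have h0 : PySem.Str.len (PySem.List.pyGetD (h :: t) 0 "") = PySem.Str.len h := by
      rw [PySem.List.pyGetD_zero_cons]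
    have hA : longitud (h :: t) = ((h :: t).foldl stepS (PySem.Str.len h, [])).2 := by
      unfold longitud
      exact loopA_eq (h :: t) (h :: t) (fun x hx => hx) 0 _ [] _ h0
    have hfirst : stepS (PySem.Str.len h, ([] : List String)) h = (PySem.Str.len h, [h]) := by
      simp [stepS]
    have hA2 : longitud (h :: t) =
        (if PySem.Str.len h = maxFrom (PySem.Str.len h) t then [h] else []) ++
          t.filter (fun x => PySem.Str.len x == maxFrom (PySem.Str.len h) t) := by
      rw [hA, List.foldl_cons, hfirst, foldS_eq]
    -- B side
    have hm : (PySem.List.max? ((h :: t).map PySem.Str.len) (fun y => y)).getD 0 =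
        maxFrom (PySem.Str.len h) t := by
      rw [List.map_cons, PySem.List.max?_id_cons, Option.getD_some, List.foldl_map]
      rfl
    have hB : longitud_alt (h :: t) =
        (h :: t).filter (fun x => PySem.Str.len x == maxFrom (PySem.Str.len h) t) := by
      unfold longitud_alt
      rw [hm]
    rw [hA2, hB, List.filter_cons]
    by_cases hh : PySem.Str.len h = maxFrom (PySem.Str.len h) t
    · rw [if_pos hh, if_pos (beq_iff_eq.mpr hh)]
      rfl
    · rw [if_neg hh, if_neg (fun hb => hh (beq_iff_eq.mp hb))]
      rfl
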